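-- pv_equiv track=rewrite | github.com/Dies-Irae-mu/game | world/wod20th/utils/stat_mappings.py | organize_by_type
-- ===== SOURCE A (Python) =====
-- def organize_by_type(items, category):
--     organized = {
--         'physical': [],
--         'social': [],
--         'mental': [],
--         'supernatural': []
--     }
--
--     for item in items:
--         if item.get('category') == category and 'stat_type' in item and 'name' in item:
--             stat_type = item['stat_type'].lower()
--             if stat_type in organized:
--                 organized[stat_type].append(item['name'])
--
--     return organized
-- ===== SOURCE B (Python) =====
-- def _keep(item, category):
--     # extract (stat_type.lower(), name) if the item belongs to the category
--     if item.get('category') != category: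
--         return None
--     st = item.get('stat_type')
--     nm = item.get('name')
--     if st is None or nm is None:
--         return None
--     return (st.lower(), nm)
--
-- def organize_by_type(items, category):
--     # stage 1: one pass extracting (lowered stat_type, name) pairs
--     pairs = [p for p in (_keep(i, category) for i in items) if p is not None]
--     # stage 2: group the pairs under the four fixed keys
--     return {st: [n for s, n in pairs if s == st]
--             for st in ('physical', 'social', 'mental', 'supernatural')}
-- ===== Notes on version B (the rewrite author's own statement) =====
-- stated objective: alternative
-- what changed: Replaces the single pass appending into pre-initialized dict buckets with a two-stage pipeline: one pass extracts (lowered stat_type, name) pairs via an early-return helper, then a dict comprehension groups those pairs under the four fixed keys.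
import Mathlib
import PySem

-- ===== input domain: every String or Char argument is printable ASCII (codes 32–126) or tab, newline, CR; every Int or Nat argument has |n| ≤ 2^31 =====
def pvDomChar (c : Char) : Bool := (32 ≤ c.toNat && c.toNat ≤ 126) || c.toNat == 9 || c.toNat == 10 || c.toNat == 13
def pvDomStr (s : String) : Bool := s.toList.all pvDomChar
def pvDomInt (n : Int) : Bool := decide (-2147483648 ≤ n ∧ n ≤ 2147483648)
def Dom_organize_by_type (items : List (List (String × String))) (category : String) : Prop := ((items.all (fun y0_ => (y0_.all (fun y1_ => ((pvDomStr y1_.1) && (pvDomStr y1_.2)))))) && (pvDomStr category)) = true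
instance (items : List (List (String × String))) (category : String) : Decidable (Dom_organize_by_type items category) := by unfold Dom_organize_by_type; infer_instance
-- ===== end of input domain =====

-- B is a two-stage pipeline — extract (lowered stat_type, name) pairs with an early-return helper, then group the pairs under the four fixed keys — instead of A's single pass appending into dict buckets (alternative decomposition, same cost).


-- ===== PORT A =====
-- one pass over items, appending item['name'] into the bucket organized[item['stat_type'].lower()]
def organize_by_type (items : List (List (String × String))) (category : String) : List (String × List String) :=
  let organized0 : PySem.Dict String (List String) :=
    PySem.Dict.mk [("physical", []), ("social", []), ("mental", []), ("supernatural", [])]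
  let final := items.foldl (fun organized item =>
    let d := PySem.Dict.mk item
    if d.get? "category" = some category ∧ (d.get? "stat_type").isSome ∧ (d.get? "name").isSome then
      let stat_type := PySem.Str.lower ((d.get? "stat_type").getD "")
      if organized.contains stat_type then
        organized.modify stat_type [] (fun l => l ++ [(d.get? "name").getD ""])
      else organized
    else organized) organized0
  final.items

-- ===== PORT B =====
-- stage-1 helper: early-return extraction of (stat_type.lower(), name)
def pvKeep (item : List (String × String)) (category : String) : Option (String × String) :=
  let d := PySem.Dict.mk item
  if ¬ (d.get? "category" = some category) then none
  else
    match d.get? "stat_type", d.get? "name" with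
    | some st, some nm => some (PySem.Str.lower st, nm)
    | _, _ => none

-- two-stage pipeline: extract pairs, then group them under the four fixed keys
def organize_by_type_alt (items : List (List (String × String))) (category : String) : List (String × List String) :=
  let pairs := items.filterMap (fun i => pvKeep i category)
  ["physical", "social", "mental", "supernatural"].map
    (fun st => (st, (pairs.filter (fun p => p.1 == st)).map Prod.snd))

-- ===== PRECONDITION & SPEC =====
def Spec_organize_by_type (items : List (List (String × String))) (category : String) (out : List (String × List String)) : Prop := out = organize_by_type_alt items category
instance (items : List (List (String × String))) (category : String) (out : List (String × List String)) : Decidable (Spec_organize_by_type items category out) := by unfold Spec_organize_by_type; infer_instance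

-- ===== CLAIM (what is proved, stated in full; the proofs are below) =====
def Claim_equal_organize_by_type : Prop := ∀ (items : List (List (String × String))) (category : String), Dom_organize_by_type items category → Spec_organize_by_type items category (organize_by_type items category)

-- ===== LEMMAS AND PROOFS =====

-- A's loop body, abstracted over the accumulator dict
def pvStep (category : String) (organized : PySem.Dict String (List String)) (item : List (String × String)) : PySem.Dict String (List String) :=
  if (PySem.Dict.mk item).get? "category" = some category ∧ ((PySem.Dict.mk item).get? "stat_type").isSome ∧ ((PySem.Dict.mk item).get? "name").isSome then
    if organized.contains (PySem.Str.lower (((PySem.Dict.mk item).get? "stat_type").getD "")) then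
      organized.modify (PySem.Str.lower (((PySem.Dict.mk item).get? "stat_type").getD "")) [] (fun l => l ++ [((PySem.Dict.mk item).get? "name").getD ""])
    else organized
  else organized

-- the per-bucket contribution of one item, phrased through B's pvKeep
def pvSel (category : String) (k : String) (item : List (String × String)) : Option String :=
  match pvKeep item category with
  | some p => if p.1 = k then some p.2 else none
  | none => none

lemma pvStep_keys (category : String) (d : PySem.Dict String (List String)) (item : List (String × String)) :
    (pvStep category d item).keys = d.keys := by
  unfold pvStep
  split
  · split
    · rename_i hcn
      simp only [PySem.Dict.modify]
      exact PySem.Dict.keys_insert_of_contains _ _ hcn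
    · rfl
  · rfl

lemma pvFold_keys (category : String) (items : List (List (String × String))) (d : PySem.Dict String (List String)) :
    (items.foldl (pvStep category) d).keys = d.keys := by
  induction items generalizing d with
  | nil => rfl
  | cons i is ih => simp [List.foldl_cons, ih, pvStep_keys]

lemma pvStep_contains (category : String) (d : PySem.Dict String (List String)) (item : List (String × String)) (k : String) :
    (pvStep category d item).contains k = d.contains k := by
  rw [PySem.Dict.contains_eq_decide_mem_keys, PySem.Dict.contains_eq_decide_mem_keys, pvStep_keys]

lemma pvStep_getD (category : String) (d : PySem.Dict String (List String)) (i : List (String × String)) (k : String)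
    (hk : d.contains k = true) :
    (pvStep category d i).getD k [] = d.getD k [] ++ (pvSel category k i).toList := by
  unfold pvStep pvSel pvKeep
  by_cases hcat : (PySem.Dict.mk i).get? "category" = some category
  · cases hst : (PySem.Dict.mk i).get? "stat_type" with
    | none => simp [hcat, hst]
    | some st =>
      cases hnm : (PySem.Dict.mk i).get? "name" with
      | none => simp [hcat, hst, hnm]
      | some nm =>
        rw [if_pos ⟨hcat, by simp [hst], by simp [hnm]⟩]
        simp only [hcat, hst, hnm, not_true, Option.getD_some]
        by_cases hl : PySem.Str.lower st = k
        · rw [hl, if_pos hk]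
          simp [PySem.Dict.getD_modify_self]
        · by_cases hcn : d.contains (PySem.Str.lower st) = true
          · rw [if_pos hcn]
            simp [PySem.Dict.getD_modify, Ne.symm hl, hl]
          · rw [if_neg hcn]
            simp [hl]
  · rw [if_neg (by tauto)]
    simp [hcat]

lemma pvFold_getD (category : String) (items : List (List (String × String))) (d : PySem.Dict String (List String)) (k : String)
    (hk : d.contains k = true) :
    (items.foldl (pvStep category) d).getD k [] = d.getD k [] ++ items.filterMap (pvSel category k) := by
  induction items generalizing d with
  | nil => simp
  | cons i is ih =>
    have hk' : (pvStep category d i).contains k = true := by rw [pvStep_contains]; exact hk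
    rw [List.foldl_cons, ih _ hk', pvStep_getD category d i k hk, List.append_assoc]
    congr 1
    cases h : pvSel category k i <;> simp [h]

-- B's grouping stage, pushed through the pair-extraction stage
lemma pvGroup_eq (category : String) (k : String) (items : List (List (String × String))) :
    ((items.filterMap (fun i => pvKeep i category)).filter (fun p => p.1 == k)).map Prod.snd
      = items.filterMap (pvSel category k) := by
  induction items with
  | nil => rfl
  | cons i is ih =>
    rw [List.filterMap_cons, List.filterMap_cons]
    cases h : pvKeep i category with
    | none => simpa [pvSel, h] using ih
    | some p =>
      by_cases hp : p.1 = k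
      · simp [pvSel, h, hp, ih]
      · simp [pvSel, h, hp, ih]

lemma pvFold_items (category : String) (items : List (List (String × String))) :
    (items.foldl (pvStep category)
        (PySem.Dict.mk [("physical", []), ("social", []), ("mental", []), ("supernatural", [])])).items =
      ["physical", "social", "mental", "supernatural"].map
        (fun st => (st, items.filterMap (pvSel category st))) := by
  set d0 : PySem.Dict String (List String) :=
    PySem.Dict.mk [("physical", []), ("social", []), ("mental", []), ("supernatural", [])] with hd0
  have hkeys : (items.foldl (pvStep category) d0).keys = ["physical", "social", "mental", "supernatural"] := by
    rw [pvFold_keys]; decide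
  have hnd : (items.foldl (pvStep category) d0).keys.Nodup := by rw [hkeys]; decide
  rw [PySem.Dict.items_eq_map_keys _ hnd ([] : List String), hkeys]
  refine List.map_congr_left (fun k hk => ?_)
  have hck : d0.contains k = true := by
    fin_cases hk <;> decide
  rw [pvFold_getD category items d0 k hck]
  have hbase : d0.getD k [] = [] := by fin_cases hk <;> decide
  rw [hbase, List.nil_append]

-- ===== VERDICT (by name: the statement is the Claim_ definition above) =====
theorem organize_by_type_spec : Claim_equal_organize_by_type := by
  intro items category _
  unfold Spec_organize_by_type organize_by_type organize_by_type_alt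
  exact (pvFold_items category items).trans
    (List.map_congr_left (fun k _ => by rw [pvGroup_eq]))
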